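-- pv_equiv track=rewrite | github.com/ysmhub/aoc2k19 | day04/d4p1.py | has_same_adjacent_digits
-- ===== SOURCE A (Python) =====
-- def has_same_adjacent_digits(y):
--     found = False
--     s = str(y)
--     l = len(s)
--     for x in range (0,l-1):
--         if s[x] == s[x+1]:
--             found = True
--     return found
-- ===== SOURCE B (Python) =====
-- def has_same_adjacent_digits(y):
--     # Run-length scan: walk maximal runs of equal characters and return True
--     # as soon as a run longer than 1 is found (early exit), else False.
--     s = str(y)
--     n = len(s)
--     i = 0
--     while i < n:
--         j = i + 1
--         while j < n and s[j] == s[i]: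
--             j += 1
--         if j - i > 1:
--             return True
--         i = j
--     return False
-- ===== Notes on version B (the rewrite author's own statement) =====
-- stated objective: alternative
-- what changed: B replaces A's index-pair loop with a sticky flag (which always scans all adjacent pairs) by a run-length scan that walks maximal runs of equal characters and returns True as soon as a multi-character run is found.
import Mathlib
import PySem

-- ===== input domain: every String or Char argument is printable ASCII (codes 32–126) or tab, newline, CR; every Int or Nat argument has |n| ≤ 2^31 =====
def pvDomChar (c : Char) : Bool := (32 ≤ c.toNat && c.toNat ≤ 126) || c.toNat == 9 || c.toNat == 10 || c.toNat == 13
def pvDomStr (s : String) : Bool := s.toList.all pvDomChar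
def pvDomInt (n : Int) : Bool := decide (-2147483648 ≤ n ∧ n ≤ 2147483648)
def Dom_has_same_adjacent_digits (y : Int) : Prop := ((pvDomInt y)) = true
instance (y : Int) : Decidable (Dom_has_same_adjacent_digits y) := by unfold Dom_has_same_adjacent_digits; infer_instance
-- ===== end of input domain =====

-- B replaces A's index-pair loop with a run-length scan over maximal runs of
-- equal characters that exits early; same return value, no speed claim proved.

-- ===== PORT A =====
-- for x in range(0, l-1): if s[x] == s[x+1]: found = True
def has_same_adjacent_digits (y : Int) : Bool :=
  let s := PySem.Int.toChars y
  let l : Int := PySem.List.len s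
  (PySem.List.pyRange 0 (l - 1) 1).foldl
    (fun found x =>
      if PySem.List.pyGet? s x = PySem.List.pyGet? s (x + 1) then true else found)
    false

-- ===== PORT B =====
-- inner while loop of Source B: length of the maximal run of c at the front of the
-- list (not counting c itself), together with the remaining suffix (index j)
def pvRun (c : Char) : List Char → Nat × List Char
  | [] => (0, [])
  | d :: t => if d == c then let (k, r) := pvRun c t; (k + 1, r) else (0, d :: t)

theorem pvRun_snd_length_le (c : Char) (t : List Char) :
    (pvRun c t).2.length ≤ t.length := by
  induction t with
  | nil => simp [pvRun]
  | cons d t ih =>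
    simp only [pvRun]
    split
    · exact le_trans ih (Nat.le_succ _)
    · simp

-- outer while loop of Source B: check each maximal run, early-return on a long one
def pvRunScan : List Char → Bool
  | [] => false
  | c :: t =>
      let p := pvRun c t
      if 0 < p.1 then true else pvRunScan p.2
  termination_by cs => cs.length
  decreasing_by
    exact Nat.lt_succ_of_le (pvRun_snd_length_le c t)

def has_same_adjacent_digits_alt (y : Int) : Bool :=
  pvRunScan (PySem.Int.toChars y)

-- ===== PRECONDITION & SPEC =====
def Spec_has_same_adjacent_digits (y : Int) (out : Bool) : Prop := out = has_same_adjacent_digits_alt y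
instance (y : Int) (out : Bool) : Decidable (Spec_has_same_adjacent_digits y out) := by unfold Spec_has_same_adjacent_digits; infer_instance

-- ===== CLAIM (what is proved, stated in full; the proofs are below) =====
def Claim_equal_has_same_adjacent_digits : Prop := ∀ (y : Int), Dom_has_same_adjacent_digits y → Spec_has_same_adjacent_digits y (has_same_adjacent_digits y)

-- ===== LEMMAS AND PROOFS =====

-- reference predicate: some two adjacent characters are equal
def pvAdj : List Char → Bool
  | a :: b :: t => (a == b) || pvAdj (b :: t)
  | _ => false

theorem foldl_if_true (p : Int → Prop) [DecidablePred p] (l : List Int) (b : Bool) :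
    l.foldl (fun acc x => if p x then true else acc) b
      = (b || l.any fun x => decide (p x)) := by
  induction l generalizing b with
  | nil => simp
  | cons x l ih =>
    simp only [List.foldl_cons, List.any_cons, ih]
    by_cases h : p x <;> simp [h]

theorem range_any_eq_pvAdj (cs : List Char) :
    ((List.range (cs.length - 1)).any fun k => decide (cs[k]? = cs[k + 1]?)) = pvAdj cs := by
  induction cs with
  | nil => simp [pvAdj]
  | cons a t ih =>
    cases t with
    | nil => simp [pvAdj]
    | cons b t' =>
      rw [show (a :: b :: t').length - 1 = (b :: t').length - 1 + 1 by simp,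
        List.range_succ_eq_map]
      simp only [List.any_cons, List.any_map, pvAdj]
      cases h : a == b
      · simp_all
        rw [← ih]
        refine List.any_congr rfl fun k => ?_
        simp [Function.comp]
      · simp_all

theorem portA_eq_pvAdj (y : Int) :
    has_same_adjacent_digits y = pvAdj (PySem.Int.toChars y) := by
  unfold has_same_adjacent_digits
  simp only [PySem.List.pyRange_one, foldl_if_true, Bool.false_or, List.any_map]
  rw [← range_any_eq_pvAdj (PySem.Int.toChars y)]
  have hlen : (PySem.List.len (PySem.Int.toChars y) - 1 - 0).toNat
      = (PySem.Int.toChars y).length - 1 := by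
    simp only [PySem.List.len_eq]
    omega
  rw [hlen]
  refine List.any_congr rfl fun k => ?_
  have h2 : (k : Int) + 1 = ((k + 1 : Nat) : Int) := by push_cast; ring
  simp only [Function.comp_apply, zero_add, h2, PySem.List.pyGet?_natCast]

theorem pvRunScan_eq_pvAdj (cs : List Char) : pvRunScan cs = pvAdj cs := by
  induction cs with
  | nil => simp [pvRunScan, pvAdj]
  | cons c t ih =>
    cases t with
    | nil => simp [pvRunScan, pvRun, pvAdj]
    | cons d t' =>
      by_cases h : d = c
      · subst h
        simp [pvRunScan, pvRun, pvAdj]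
      · have hbe : (d == c) = false := by simp [h]
        have hbe' : (c == d) = false := by simp [Ne.symm h]
        rw [pvRunScan]
        simp only [pvRun, hbe, pvAdj, hbe', Bool.false_or]
        simpa [pvRunScan] using ih

-- ===== VERDICT (by name: the statement is the Claim_ definition above) =====
theorem has_same_adjacent_digits_spec : Claim_equal_has_same_adjacent_digits := by
  intro y _
  unfold Spec_has_same_adjacent_digits has_same_adjacent_digits_alt
  rw [portA_eq_pvAdj, pvRunScan_eq_pvAdj]
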